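-- pv_equiv track=rewrite | github.com/RobinAxelsson/ChalmersLab1 | wordfreq.py | typeSplit
-- ===== SOURCE A (Python) =====
-- import enum
--
-- class strType(enum.Enum):
--     Alpha = 0
--     Digit = 1
--     Symbol = 2
--     White = 3
--
--     def checkType(char: str):
--         if char.isspace():
--             return strType.White
--         if char.isdigit():
--             return strType.Digit
--         if char.isalpha():
--             return strType.Alpha
--         else:
--             return strType.Symbol
--
-- def typeSplit(word: str):
--     output: list[str] = []
--     temp = ''
--     lastType = strType.Alpha
--
--     for char in word:
--         newType = strType.checkType(char)
--
--         # all symbols are seperated from each other in a new string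
--         if newType == strType.Symbol:
--             if temp != '':
--                 output.append(temp)
--             output.append(char)
--             temp=''
--             lastType = strType.Symbol
--
--         # whites are allways skipped
--         elif newType == strType.White:
--             if temp != '':
--                 output.append(temp)
--             temp=''
--         # if new chartype is different from last save the
--         # temporary string and start building a new one
--         elif newType != lastType:
--             if temp != '':
--                 output.append(temp)
--             temp = char
--             lastType = newType
--         elif newType == strType.Alpha or newType == strType.Digit:
--             temp+=char
--
--     if temp != '':
--         output.append(temp)
--     return output
-- ===== SOURCE B (Python) =====
-- import enum
--
-- class strType(enum.Enum):
--     Alpha = 0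
--     Digit = 1
--     Symbol = 2
--     White = 3
--
--     def checkType(char: str):
--         if char.isspace():
--             return strType.White
--         if char.isdigit():
--             return strType.Digit
--         if char.isalpha():
--             return strType.Alpha
--         else:
--             return strType.Symbol
--
-- def typeSplit(word: str):
--     # two-phase: scan a maximal run of equal-type chars, then emit it
--     output = []
--     i, n = 0, len(word)
--     while i < n:
--         t = strType.checkType(word[i])
--         j = i + 1
--         while j < n and strType.checkType(word[j]) == t:
--             j += 1
--         if t == strType.Symbol:
--             output.extend(word[i:j])        # each symbol on its own
--         elif t != strType.White:
--             output.append(word[i:j])        # one token per alpha/digit run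
--         i = j
--     return output
-- ===== Notes on version B (the rewrite author's own statement) =====
-- stated objective: alternative
-- what changed: Replaced the per-character state machine (temp string accumulator + lastType bookkeeping) by a two-phase run scanner: find each maximal run of equal-type characters, then emit it (skip White, one token per Symbol char, one slice per Alpha/Digit run).
import Mathlib
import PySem

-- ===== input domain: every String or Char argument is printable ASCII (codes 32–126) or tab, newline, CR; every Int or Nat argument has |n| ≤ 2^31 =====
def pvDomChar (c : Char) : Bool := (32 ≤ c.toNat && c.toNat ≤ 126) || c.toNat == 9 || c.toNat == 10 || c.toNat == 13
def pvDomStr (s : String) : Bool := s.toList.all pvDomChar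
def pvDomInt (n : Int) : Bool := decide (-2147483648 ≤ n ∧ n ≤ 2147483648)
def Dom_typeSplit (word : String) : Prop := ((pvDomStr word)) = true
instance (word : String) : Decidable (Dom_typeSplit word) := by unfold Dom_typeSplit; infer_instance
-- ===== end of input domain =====

-- B replaces A's per-char temp/lastType state machine with a run scanner (span then emit); same output, same cost.

inductive PvStrType | Alpha | Digit | Symbol | White
deriving DecidableEq, Repr

def pvCheckType (c : Char) : PvStrType :=
  if PySem.Chars.isspace c then PvStrType.White
  else if PySem.Chars.isdigit c then PvStrType.Digit
  else if PySem.Chars.isalpha c then PvStrType.Alpha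
  else PvStrType.Symbol

-- ===== PORT A =====
-- A's for-loop over the characters, with state (output, temp, lastType); strings as List Char.
def typeSplitLoop : List Char → List (List Char) → List Char → PvStrType → List (List Char)
  | [], output, temp, _ => if temp ≠ [] then output ++ [temp] else output
  | c :: rest, output, temp, lastType =>
    let newType := pvCheckType c
    if newType = PvStrType.Symbol then
      typeSplitLoop rest ((if temp ≠ [] then output ++ [temp] else output) ++ [[c]]) [] PvStrType.Symbol
    else if newType = PvStrType.White then
      typeSplitLoop rest (if temp ≠ [] then output ++ [temp] else output) [] lastType
    else if newType ≠ lastType then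
      typeSplitLoop rest (if temp ≠ [] then output ++ [temp] else output) [c] newType
    else if newType = PvStrType.Alpha ∨ newType = PvStrType.Digit then
      typeSplitLoop rest output (temp ++ [c]) lastType
    else
      typeSplitLoop rest output temp lastType

def typeSplit (word : String) : List String :=
  (typeSplitLoop word.toList [] [] PvStrType.Alpha).map String.ofList

-- ===== PORT B =====
-- Source B's outer while: scan a maximal run of chars of one type (the inner while = takeWhile/dropWhile),
-- then emit it: White skipped, each Symbol on its own, one token per Alpha/Digit run.
def typeSplitAltAux : List Char → List (List Char)
  | [] => []
  | c :: rest =>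
    let t := pvCheckType c
    let grp := rest.takeWhile (fun d => pvCheckType d = t)
    let rest' := rest.dropWhile (fun d => pvCheckType d = t)
    (match t with
     | PvStrType.White => []
     | PvStrType.Symbol => (c :: grp).map (fun d => [d])
     | _ => [c :: grp]) ++ typeSplitAltAux rest'
termination_by l => l.length
decreasing_by
  have := List.length_dropWhile_le (fun d => decide (pvCheckType d = pvCheckType c)) rest
  simp only [List.length_cons]
  omega

def typeSplit_alt (word : String) : List String :=
  (typeSplitAltAux word.toList).map String.ofList

-- ===== PRECONDITION & SPEC =====
def Spec_typeSplit (word : String) (out : List String) : Prop := out = typeSplit_alt word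
instance (word : String) (out : List String) : Decidable (Spec_typeSplit word out) := by unfold Spec_typeSplit; infer_instance

-- ===== CLAIM (what is proved, stated in full; the proofs are below) =====
def Claim_equal_typeSplit : Prop := ∀ (word : String), Dom_typeSplit word → Spec_typeSplit word (typeSplit word)

-- ===== LEMMAS AND PROOFS =====

-- B's scanner peels one Symbol char / one White char off the front of a run.
theorem pv_symbolStep (c : Char) (rest : List Char) (h : pvCheckType c = PvStrType.Symbol) :
    typeSplitAltAux (c :: rest) = [c] :: typeSplitAltAux rest := by
  cases rest with
  | nil => simp [typeSplitAltAux, h]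
  | cons d rest2 =>
    by_cases hd : pvCheckType d = PvStrType.Symbol
    · rw [typeSplitAltAux, typeSplitAltAux]
      simp [h, hd]
    · rw [typeSplitAltAux]
      simp [h, hd]

theorem pv_whiteStep (c : Char) (rest : List Char) (h : pvCheckType c = PvStrType.White) :
    typeSplitAltAux (c :: rest) = typeSplitAltAux rest := by
  cases rest with
  | nil => simp [typeSplitAltAux, h]
  | cons d rest2 =>
    by_cases hd : pvCheckType d = PvStrType.White
    · rw [typeSplitAltAux, typeSplitAltAux]
      simp [h, hd]
    · rw [typeSplitAltAux]
      simp [h, hd]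

-- alpha/digit head: B's scanner collects the whole run as one token
theorem pv_runStep (c : Char) (rest : List Char)
    (h : pvCheckType c = PvStrType.Alpha ∨ pvCheckType c = PvStrType.Digit) :
    typeSplitAltAux (c :: rest) =
      (c :: rest.takeWhile (fun d => pvCheckType d = pvCheckType c)) ::
        typeSplitAltAux (rest.dropWhile (fun d => pvCheckType d = pvCheckType c)) := by
  rw [typeSplitAltAux]
  rcases h with h | h <;> simp [h]

theorem pv_joint : ∀ (n : ℕ) (l : List Char), l.length ≤ n →
    (∀ (out : List (List Char)) (lt : PvStrType),
        typeSplitLoop l out [] lt = out ++ typeSplitAltAux l) ∧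
    (∀ (out : List (List Char)) (s : List Char) (t : PvStrType), s ≠ [] →
        (t = PvStrType.Alpha ∨ t = PvStrType.Digit) →
        typeSplitLoop l out s t =
          out ++ [s ++ l.takeWhile (fun d => pvCheckType d = t)] ++
            typeSplitAltAux (l.dropWhile (fun d => pvCheckType d = t))) := by
  intro n
  induction n with
  | zero =>
    intro l hl
    have hl0 : l = [] := List.eq_nil_of_length_eq_zero (Nat.le_zero.mp hl)
    subst hl0
    constructor
    · intro out lt; simp [typeSplitLoop, typeSplitAltAux]
    · intro out s t hs ht; simp [typeSplitLoop, typeSplitAltAux, hs]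
  | succ n ih =>
    intro l hl
    cases l with
    | nil =>
      constructor
      · intro out lt; simp [typeSplitLoop, typeSplitAltAux]
      · intro out s t hs ht; simp [typeSplitLoop, typeSplitAltAux, hs]
    | cons c rest =>
      have hrest : rest.length ≤ n := by simpa using Nat.succ_le_succ_iff.mp hl
      constructor
      · -- main: empty temp
        intro out lt
        rcases hc : pvCheckType c with hA | hD | hS | hW
        · -- Alpha head
          have step : typeSplitLoop (c :: rest) out [] lt
              = typeSplitLoop rest out [c] PvStrType.Alpha := by
            rw [typeSplitLoop]
            by_cases hlt : PvStrType.Alpha = lt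
            · simp [hc, ← hlt]
            · simp [hc, hlt]
          rw [step, (ih rest hrest).2 out [c] PvStrType.Alpha (by simp) (Or.inl rfl),
              pv_runStep c rest (Or.inl hc)]
          simp [hc]
        · -- Digit head
          have step : typeSplitLoop (c :: rest) out [] lt
              = typeSplitLoop rest out [c] PvStrType.Digit := by
            rw [typeSplitLoop]
            by_cases hlt : PvStrType.Digit = lt
            · simp [hc, ← hlt]
            · simp [hc, hlt]
          rw [step, (ih rest hrest).2 out [c] PvStrType.Digit (by simp) (Or.inr rfl),
              pv_runStep c rest (Or.inr hc)]
          simp [hc]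
        · -- Symbol head
          rw [typeSplitLoop]
          simp only [hc]
          rw [(ih rest hrest).1, pv_symbolStep c rest hc]
          simp
        · -- White head
          rw [typeSplitLoop]
          simp only [hc, reduceCtorEq, if_false]
          rw [(ih rest hrest).1, pv_whiteStep c rest hc]
          simp
      · -- acc: nonempty temp of type t ∈ {Alpha, Digit}
        intro out s t hs ht
        rcases hc : pvCheckType c with hA | hD | hS | hW
        · -- Alpha head
          rcases ht with rfl | rfl
          · -- t = Alpha : extend the run
            have step : typeSplitLoop (c :: rest) out s PvStrType.Alpha
                = typeSplitLoop rest out (s ++ [c]) PvStrType.Alpha := by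
              rw [typeSplitLoop]; simp [hc]
            rw [step, (ih rest hrest).2 out (s ++ [c]) PvStrType.Alpha (by simp) (Or.inl rfl)]
            simp [hc]
          · -- t = Digit : type change, flush s
            have step : typeSplitLoop (c :: rest) out s PvStrType.Digit
                = typeSplitLoop rest (out ++ [s]) [c] PvStrType.Alpha := by
              rw [typeSplitLoop]; simp [hc, hs]
            rw [step, (ih rest hrest).2 (out ++ [s]) [c] PvStrType.Alpha (by simp) (Or.inl rfl)]
            simp [hc, pv_runStep c rest (Or.inl hc)]
        · -- Digit head
          rcases ht with rfl | rfl
          · -- t = Alpha : type change, flush s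
            have step : typeSplitLoop (c :: rest) out s PvStrType.Alpha
                = typeSplitLoop rest (out ++ [s]) [c] PvStrType.Digit := by
              rw [typeSplitLoop]; simp [hc, hs]
            rw [step, (ih rest hrest).2 (out ++ [s]) [c] PvStrType.Digit (by simp) (Or.inr rfl)]
            simp [hc, pv_runStep c rest (Or.inr hc)]
          · -- t = Digit : extend the run
            have step : typeSplitLoop (c :: rest) out s PvStrType.Digit
                = typeSplitLoop rest out (s ++ [c]) PvStrType.Digit := by
              rw [typeSplitLoop]; simp [hc]
            rw [step, (ih rest hrest).2 out (s ++ [c]) PvStrType.Digit (by simp) (Or.inr rfl)]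
            simp [hc]
        · -- Symbol head : flush s, emit the symbol alone
          have hts : pvCheckType c ≠ t := by rcases ht with rfl | rfl <;> simp [hc]
          have step : typeSplitLoop (c :: rest) out s t
              = typeSplitLoop rest (out ++ [s] ++ [[c]]) [] PvStrType.Symbol := by
            rw [typeSplitLoop]; simp [hc, hs]
          rw [step, (ih rest hrest).1]
          simp [hts, pv_symbolStep c rest hc]
        · -- White head : flush s, skip
          have hts : pvCheckType c ≠ t := by rcases ht with rfl | rfl <;> simp [hc]
          have step : typeSplitLoop (c :: rest) out s t
              = typeSplitLoop rest (out ++ [s]) [] t := by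
            rw [typeSplitLoop]; simp [hc, hs]
          rw [step, (ih rest hrest).1]
          simp [hts, pv_whiteStep c rest hc]

theorem pv_main : ∀ (l : List Char) (out : List (List Char)) (lt : PvStrType),
    typeSplitLoop l out [] lt = out ++ typeSplitAltAux l := by
  intro l out lt
  exact (pv_joint l.length l le_rfl).1 out lt

-- ===== VERDICT (by name: the statement is the Claim_ definition above) =====
theorem typeSplit_spec : Claim_equal_typeSplit := by
  intro word _
  unfold Spec_typeSplit typeSplit typeSplit_alt
  rw [pv_main]
  simp
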